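-- pv_equiv track=rewrite | github.com/ubc-provenance/PIDSMaker | src/config.py | get_dependees
-- ===== SOURCE A (Python) =====
-- from collections import OrderedDict
--
-- def get_dependees(sub: str, dependencies: dict, result_set: set):
--      """
--      Returns the set of the subtasks happening before `sub`.
--      """
--      dependencies = OrderedDict(sorted(dependencies.items(), reverse=True))
--
--      def helper(sub):
--           for subtask, deps in dependencies.items():
--                if sub == subtask:
--                     if len(deps) > 0:
--                          dep = deps[0]
--                          result_set.add(dep)
--                          helper(dep)
--      helper(sub)
--      return result_set
-- ===== SOURCE B (Python) =====
-- def get_dependees(sub: str, dependencies: dict, result_set: set):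
--     """
--     Returns the set of the subtasks happening before `sub`.
--     """
--     # Stage 1: materialize the first-dependency chain starting at `sub`.
--     chain = []
--     node = sub
--     while dependencies.get(node):
--         node = dependencies[node][0]
--         chain.append(node)
--     # Stage 2: add all chain nodes to the result set.
--     for dep in chain:
--         result_set.add(dep)
--     return result_set
-- ===== Notes on version B (the rewrite author's own statement) =====
-- stated objective: alternative
-- what changed: Replaces A's reverse-sort plus recursive helper that rescans every dict item at each level with two staged passes: an iterative direct-lookup walk that first materializes the first-dependency chain as a list, then a loop adding those nodes to the set.
import Mathlib
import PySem

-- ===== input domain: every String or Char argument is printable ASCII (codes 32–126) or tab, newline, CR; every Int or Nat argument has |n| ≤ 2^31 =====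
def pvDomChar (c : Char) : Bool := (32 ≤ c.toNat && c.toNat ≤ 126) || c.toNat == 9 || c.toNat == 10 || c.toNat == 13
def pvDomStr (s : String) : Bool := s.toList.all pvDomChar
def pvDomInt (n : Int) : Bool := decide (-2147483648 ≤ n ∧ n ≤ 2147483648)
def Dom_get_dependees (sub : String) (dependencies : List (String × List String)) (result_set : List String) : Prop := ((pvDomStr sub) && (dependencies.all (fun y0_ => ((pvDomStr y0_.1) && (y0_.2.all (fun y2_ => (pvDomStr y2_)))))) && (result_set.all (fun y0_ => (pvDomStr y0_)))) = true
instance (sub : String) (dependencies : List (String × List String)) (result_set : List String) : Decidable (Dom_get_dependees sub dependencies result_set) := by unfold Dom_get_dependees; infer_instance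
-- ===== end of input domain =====

-- B drops A's sort and recursive per-level rescan: it materializes the first-dependency chain
-- by direct dict lookups in one pass and then adds those nodes to the set in a second pass
-- (objective: alternative decomposition). Both A and B mutate `result_set` in place and return
-- the same object; the equivalence proved here is about the returned value.

-- ===== PORT A =====
-- `helper` recurses without bound in Python; the fuel `dependencies.length + 1` only makes the
-- same computation total — under Pre_ (acyclic chain) it is never exhausted.
-- Python sorts the (key, deps) pairs; since a dict's keys are distinct (Pre_ requires Nodup),
-- comparing by the key alone is exact.
def getDependeesHelper : Nat → List (String × List String) → String → List String → List String
  | 0, _, _, result_set => result_set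
  | Nat.succ n, items, sub, result_set =>
    items.foldl (fun rs p =>
      if sub == p.1 then
        match p.2 with
        | [] => rs
        | dep :: _ => getDependeesHelper n items dep (PySem.Set.add rs dep)
      else rs) result_set

def get_dependees (sub : String) (dependencies : List (String × List String)) (result_set : List String) : List String :=
  let items := PySem.List.sorted dependencies (fun p => p.1) true
  getDependeesHelper (dependencies.length + 1) items sub result_set

-- ===== PORT B =====
-- stage 1: the `while dependencies.get(node):` loop building `chain`; same fuel remark as for A.
def getDependeesChainList : Nat → PySem.Dict String (List String) → String → List String
  | 0, _, _ => []
  | Nat.succ n, d, node =>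
    match PySem.Dict.getD d node [] with
    | [] => []
    | dep :: _ => dep :: getDependeesChainList n d dep

-- stage 2: `for dep in chain: result_set.add(dep)`
def get_dependees_alt (sub : String) (dependencies : List (String × List String)) (result_set : List String) : List String :=
  let chain := getDependeesChainList (dependencies.length + 1) (PySem.Dict.mk dependencies) sub
  chain.foldl PySem.Set.add result_set

-- ===== PRECONDITION & SPEC =====
-- does the first-dependency chain from `sub` reach a node with no dependencies within n steps?
def pvChainStops : Nat → List (String × List String) → String → Bool
  | 0, dependencies, sub => decide (PySem.Dict.getD (PySem.Dict.mk dependencies) sub [] = [])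
  | Nat.succ n, dependencies, sub =>
    match PySem.Dict.getD (PySem.Dict.mk dependencies) sub [] with
    | [] => true
    | dep :: _ => pvChainStops n dependencies dep

-- Pre_ requires the association list to have distinct keys (automatic for a Python dict) and the
-- first-dependency chain from `sub` to reach a dependency-free node within |dependencies| steps —
-- i.e. the chain hits no cycle; on a cyclic chain Python A raises RecursionError (returns nothing).
def Pre_get_dependees (sub : String) (dependencies : List (String × List String)) (result_set : List String) : Prop :=
  (dependencies.map Prod.fst).Nodup ∧ pvChainStops dependencies.length dependencies sub = true
instance (sub : String) (dependencies : List (String × List String)) (result_set : List String) : Decidable (Pre_get_dependees sub dependencies result_set) := by unfold Pre_get_dependees; infer_instance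

def pvWitness_get_dependees : String × (List (String × List String)) × List String :=
  ("a", [("a", ["b"]), ("b", [])], ["c"])

def Spec_get_dependees (sub : String) (dependencies : List (String × List String)) (result_set : List String) (out : List String) : Prop := out = get_dependees_alt sub dependencies result_set
instance (sub : String) (dependencies : List (String × List String)) (result_set : List String) (out : List String) : Decidable (Spec_get_dependees sub dependencies result_set out) := by unfold Spec_get_dependees; infer_instance

-- ===== CLAIM (what is proved, stated in full; the proofs are below) =====
def Claim_equal_get_dependees : Prop := ∀ (sub : String) (dependencies : List (String × List String)) (result_set : List String), Dom_get_dependees sub dependencies result_set → Pre_get_dependees sub dependencies result_set → Spec_get_dependees sub dependencies result_set (get_dependees sub dependencies result_set)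

-- ===== LEMMAS AND PROOFS =====

-- a fold whose body fires only on key `sub` is the identity when no element has that key
theorem pv_foldl_no_match (sub : String) (g : String × List String → List String → List String)
    (l : List (String × List String)) (rs : List String)
    (h : ∀ p ∈ l, ¬ (sub == p.1) = true) :
    l.foldl (fun rs p => if sub == p.1 then g p rs else rs) rs = rs := by
  induction l generalizing rs with
  | nil => rfl
  | cons p t ih =>
    simp only [List.foldl_cons]
    rw [if_neg (h p (List.mem_cons_self))]
    exact ih rs (fun q hq => h q (List.mem_cons_of_mem _ hq))

-- with distinct keys, the fold applies its body to the unique matching entry (if any)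
theorem pv_foldl_unique_match (sub : String) (g : String × List String → List String → List String)
    (l : List (String × List String)) (rs : List String)
    (hnd : (l.map Prod.fst).Nodup) :
    l.foldl (fun rs p => if sub == p.1 then g p rs else rs) rs
      = match l.find? (fun p => p.1 == sub) with
        | some p => g p rs
        | none => rs := by
  induction l generalizing rs with
  | nil => rfl
  | cons p t ih =>
    simp only [List.map_cons, List.nodup_cons] at hnd
    simp only [List.foldl_cons, List.find?_cons]
    cases h : (sub == p.1) with
    | true =>
      have hsub : sub = p.1 := (beq_iff_eq).1 h
      have h' : (p.1 == sub) = true := (beq_iff_eq).2 hsub.symm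
      have hnone : ∀ q ∈ t, ¬ (sub == q.1) = true := by
        intro q hq hc
        have hq1 : p.1 = q.1 := hsub ▸ (beq_iff_eq).1 hc
        exact hnd.1 (hq1 ▸ List.mem_map_of_mem hq)
      rw [if_pos rfl, h', pv_foldl_no_match sub g t (g p rs) hnone]
    | false =>
      have hne : sub ≠ p.1 := by simpa using h
      have h' : (p.1 == sub) = false := by simpa using fun e => hne e.symm
      rw [if_neg (by simp), h']
      exact ih rs hnd.2

-- find? by key is invariant under permutation when the keys are distinct
theorem pv_find?_perm (sub : String) (l l' : List (String × List String))
    (hp : l.Perm l') (hnd : (l'.map Prod.fst).Nodup) :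
    l.find? (fun p => p.1 == sub) = l'.find? (fun p => p.1 == sub) := by
  cases hfind : l'.find? (fun p => p.1 == sub) with
  | none =>
    rw [List.find?_eq_none] at hfind ⊢
    exact fun x hx => hfind x (hp.mem_iff.1 hx)
  | some p =>
    have hmem : p ∈ l' := List.mem_of_find?_eq_some hfind
    have hkey : (p.1 == sub) = true := List.find?_some (p := fun r : String × List String => r.1 == sub) hfind
    have hmem' : p ∈ l := hp.mem_iff.2 hmem
    cases hfind2 : l.find? (fun p => p.1 == sub) with
    | none =>
      rw [List.find?_eq_none] at hfind2
      exact absurd hkey (hfind2 p hmem')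
    | some q =>
      have hqmem : q ∈ l' := hp.mem_iff.1 (List.mem_of_find?_eq_some hfind2)
      have hqkey : (q.1 == sub) = true := List.find?_some (p := fun r : String × List String => r.1 == sub) hfind2
      have : q = p := by
        apply List.inj_on_of_nodup_map hnd hqmem hmem
        rw [(beq_iff_eq).1 hqkey, (beq_iff_eq).1 hkey]
      rw [this]

-- first-match getD on a literal dict is find? by key
theorem pv_getD_mk (sub : String) (l : List (String × List String)) :
    PySem.Dict.getD (PySem.Dict.mk l) sub []
      = match l.find? (fun p => p.1 == sub) with
        | some p => p.2
        | none => [] := by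
  cases h : l.find? (fun p => p.1 == sub) with
  | none => simp [PySem.Dict.getD, PySem.Dict.get?, h]
  | some p => simp [PySem.Dict.getD, PySem.Dict.get?, h]

-- main invariant: A's fueled helper over the sorted list = folding Set.add over B's chain list
theorem pv_main (n : Nat) (dependencies : List (String × List String))
    (hnd : (dependencies.map Prod.fst).Nodup) :
    ∀ (sub : String) (rs : List String),
      getDependeesHelper n (PySem.List.sorted dependencies (fun p => p.1) true) sub rs
        = (getDependeesChainList n (PySem.Dict.mk dependencies) sub).foldl PySem.Set.add rs := by
  induction n with
  | zero => intro sub rs; rfl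
  | succ n ih =>
    intro sub rs
    have hperm : (PySem.List.sorted dependencies (fun p => p.1) true).Perm dependencies :=
      PySem.List.sorted_perm ..
    have hnds : ((PySem.List.sorted dependencies (fun p => p.1) true).map Prod.fst).Nodup :=
      (hperm.map Prod.fst).nodup_iff.2 hnd
    show (PySem.List.sorted dependencies (fun p => p.1) true).foldl _ rs = _
    rw [pv_foldl_unique_match sub _ _ rs hnds,
        pv_find?_perm sub _ dependencies hperm hnd]
    show _ = ((match PySem.Dict.getD (PySem.Dict.mk dependencies) sub [] with
              | [] => ([] : List String)
              | dep :: _ => dep :: getDependeesChainList n (PySem.Dict.mk dependencies) dep)).foldl PySem.Set.add rs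
    rw [pv_getD_mk]
    cases hfind : dependencies.find? (fun p => p.1 == sub) with
    | none => rfl
    | some p =>
      obtain ⟨k, v⟩ := p
      cases v with
      | nil => rfl
      | cons dep rest =>
        simpa using ih dep (PySem.Set.add rs dep)

-- ===== VERDICT (by name: the statement is the Claim_ definition above) =====
theorem get_dependees_spec : Claim_equal_get_dependees := by
  intro sub dependencies result_set _ hpre
  unfold Spec_get_dependees get_dependees get_dependees_alt
  exact pv_main (dependencies.length + 1) dependencies hpre.1 sub result_set
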